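-- pv_equiv track=rewrite | github.com/Hnat-Ilkiv/algorithms_lab_ir2022_ilkiv | src/main.py | find_unreachable
-- ===== SOURCE A (Python) =====
-- def bfs(
--     first_gas_storage: str, gas_storage: list[str], pipelines: list[str]
-- ) -> list[str]:
--     """
--     Perform Breadth-First Search (BFS) to find reachable locations from a given gas storage.
--
--     Args:
--         first_gas_storage (str): The starting gas storage.
--         gas_storage (list): List of gas storage locations.
--         pipelines (list): List of active pipelines.
--
--     Returns:
--         list: List of reachable locations.
--     """
--     queue = [first_gas_storage]
--     visited = []
--
--     while queue:
--         current_note = queue.pop(0)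
--         if current_note not in visited:
--             visited.append(current_note)
--
--             for connection in pipelines:
--                 if (
--                     connection[0] == current_note
--                     and connection[1] not in gas_storage
--                 ):
--                     queue.append(connection[1])
--
--     visited.pop(0)
--     return visited
--
-- def find_unreachable(
--     city: list[str], gas_storage: list[str], pipelines: list[str]
-- ) -> list[str, list[str]]:
--     """
--     Find gas storage locations and the corresponding unreachable cities.
--
--     Args:
--         city (list): List of cities.
--         gas_storage (list): List of gas storage locations.
--         pipelines (list): List of active pipelines.
--
--     Returns:
--         list: List of unreachable locations and their corresponding cities.
--     """
--     unreachable = []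
--
--     for storage in gas_storage:
--         available = bfs(storage, gas_storage, pipelines)
--         unavailable = [
--             element for element in city if element not in available
--         ]
--
--         if unavailable:
--             unreachable.append([storage, unavailable])
--
--     return unreachable
-- ===== SOURCE B (Python) =====
-- def find_unreachable(city, gas_storage, pipelines):
--     # Global label-propagation: compute, for every node at once, the set of
--     # storages that reach it, by iterating over the edge list to a fixpoint
--     # (no per-storage graph search, no queue).
--     storage_set = set(gas_storage)
--     edges = [(p[0], p[1]) for p in pipelines]
--     reach = {}  # node -> set of storages with a nonempty storage-avoiding path to it
--     for a, b in edges: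
--         if a in storage_set and b not in storage_set:
--             reach.setdefault(b, set()).add(a)
--     inner = [(a, b) for a, b in edges if a not in storage_set and b not in storage_set]
--     changed = True
--     while changed:
--         changed = False
--         for a, b in inner:
--             ra = reach.get(a, set())
--             if ra:
--                 rb = reach.get(b, set())
--                 new = rb | ra
--                 if len(new) != len(rb):
--                     reach[b] = new
--                     changed = True
--     result = []
--     for s in gas_storage:
--         unavailable = [c for c in city if s not in reach.get(c, ())]
--         if unavailable:
--             result.append([s, unavailable])
--     return result
-- ===== Notes on version B (the rewrite author's own statement) =====
-- stated objective: alternative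
-- what changed: B replaces A's per-storage BFS (queue, visited list, pipeline rescan per node) by one global label-propagation fixpoint: it seeds each node with the storages that feed it directly and repeatedly relaxes the inner (non-storage) edge list, propagating sets of source storages until nothing changes, then answers every storage from the one computed table.
-- outside the precondition, e.g. on find_unreachable(['b'], ['a'], ['x']): A returns [('a', ['b'])], B raises IndexError; on find_unreachable([], [], ['']): A returns [], B raises IndexError
import Mathlib
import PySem

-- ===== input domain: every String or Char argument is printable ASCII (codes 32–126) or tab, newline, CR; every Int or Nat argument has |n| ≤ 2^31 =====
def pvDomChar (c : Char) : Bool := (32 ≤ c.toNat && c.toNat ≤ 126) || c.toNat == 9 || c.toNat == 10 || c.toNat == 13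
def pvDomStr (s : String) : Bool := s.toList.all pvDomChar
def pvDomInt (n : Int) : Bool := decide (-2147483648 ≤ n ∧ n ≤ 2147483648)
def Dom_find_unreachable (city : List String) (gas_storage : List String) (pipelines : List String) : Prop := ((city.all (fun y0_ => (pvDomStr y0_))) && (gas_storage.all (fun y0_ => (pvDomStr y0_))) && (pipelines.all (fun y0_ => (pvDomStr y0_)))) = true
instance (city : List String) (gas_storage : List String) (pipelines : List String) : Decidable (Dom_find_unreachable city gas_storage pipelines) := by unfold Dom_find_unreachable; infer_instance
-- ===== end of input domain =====

-- B replaces A's per-storage BFS by one global label-propagation fixpoint over the edge list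
-- (seed each node with the storages feeding it directly, relax inner edges until no change);
-- equivalence of the returned value is proved on Pre_.


-- ===== PORT A =====
-- inner 'for connection in pipelines: if connection[0] == current_note and connection[1] not in gas_storage: queue.append(connection[1])'
-- (connection[0]/connection[1] are PySem.Str.pyGet?; the 'none' branches are IndexError territory, excluded by Pre_)
def pvPushA (gas_storage : List String) (pipelines : List String) (cur : String) (queue : List String) : List String :=
  pipelines.foldl (fun q conn =>
    match PySem.Str.pyGet? conn 0 with
    | none => q
    | some c0 =>
      if String.ofList [c0] = cur then
        match PySem.Str.pyGet? conn 1 with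
        | none => q
        | some c1 => if String.ofList [c1] ∈ gas_storage then q else q ++ [String.ofList [c1]]
      else q) queue

-- 'while queue:' loop of bfs; fuel only makes the recursion structural (proved sufficient below)
def pvLoopA (gas_storage : List String) (pipelines : List String) : Nat → List String → List String → List String
  | 0, visited, _ => visited
  | fuel + 1, visited, queue =>
    match queue with
    | [] => visited
    | cur :: rest =>
      if cur ∈ visited then pvLoopA gas_storage pipelines fuel visited rest
      else pvLoopA gas_storage pipelines fuel (visited ++ [cur]) (pvPushA gas_storage pipelines cur rest)

def pvFuelA (pipelines : List String) : Nat := (pipelines.length + 2) * (pipelines.length + 2)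

-- bfs(first_gas_storage, gas_storage, pipelines); 'visited.pop(0)' drops the start node
def pvBfs (first_gas_storage : String) (gas_storage : List String) (pipelines : List String) : List String :=
  let visited := pvLoopA gas_storage pipelines (pvFuelA pipelines) [] [first_gas_storage]
  match PySem.List.pop? visited 0 with
  | some (_, rest) => rest
  | none => []   -- dead branch: visited is never empty (fuel ≥ 1)

def find_unreachable (city : List String) (gas_storage : List String) (pipelines : List String) : List (String × List String) :=
  gas_storage.foldl (fun unreachable storage =>
    let available := pvBfs storage gas_storage pipelines
    let unavailable := city.filter (fun element => decide (element ∉ available))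
    if unavailable.isEmpty then unreachable else unreachable ++ [(storage, unavailable)]) []

-- ===== PORT B =====
-- 'edges = [(p[0], p[1]) for p in pipelines]' (pyGet? none = IndexError, excluded by Pre_)
def pvEdges (pipelines : List String) : List (String × String) :=
  pipelines.filterMap (fun p =>
    match PySem.Str.pyGet? p 0, PySem.Str.pyGet? p 1 with
    | some a, some b => some (String.ofList [a], String.ofList [b])
    | _, _ => none)

-- 'for a, b in edges: if a in storage_set and b not in storage_set: reach.setdefault(b, set()).add(a)'
def pvInitReach (ss : PySem.Set String) (edges : List (String × String)) :
    PySem.Dict String (PySem.Set String) :=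
  edges.foldl (fun r e =>
    if e.1 ∈ ss ∧ e.2 ∉ ss then r.insert e.2 (PySem.Set.add (r.getD e.2 []) e.1) else r)
    PySem.Dict.empty

-- body of 'for a, b in inner:' inside the fixpoint loop; the Bool is 'changed'
def pvStep (st : PySem.Dict String (PySem.Set String) × Bool) (e : String × String) :
    PySem.Dict String (PySem.Set String) × Bool :=
  let ra := st.1.getD e.1 []
  if ra.isEmpty then st
  else
    let nw := PySem.Set.union (st.1.getD e.2 []) ra
    if PySem.Set.len nw = PySem.Set.len (st.1.getD e.2 []) then st
    else (st.1.insert e.2 nw, true)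

-- one 'changed = False; for a, b in inner: …' pass
def pvPass (inner : List (String × String)) (r : PySem.Dict String (PySem.Set String)) :
    PySem.Dict String (PySem.Set String) × Bool :=
  inner.foldl pvStep (r, false)

-- 'while changed:'; fuel only makes the recursion structural (proved sufficient below)
def pvFix (inner : List (String × String)) :
    Nat → PySem.Dict String (PySem.Set String) → PySem.Dict String (PySem.Set String)
  | 0, r => r
  | fuel + 1, r =>
    let st := pvPass inner r
    if st.2 then pvFix inner fuel st.1 else st.1

def pvFixFuel (pipelines : List String) : Nat := pipelines.length * pipelines.length + 1

def find_unreachable_alt (city : List String) (gas_storage : List String) (pipelines : List String) : List (String × List String) :=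
  let ss := PySem.Set.ofList gas_storage
  let edges := pvEdges pipelines
  let inner := edges.filter (fun e => decide (e.1 ∉ ss ∧ e.2 ∉ ss))
  let reach := pvFix inner (pvFixFuel pipelines) (pvInitReach ss edges)
  gas_storage.foldl (fun result s =>
    let unavailable := city.filter (fun c => decide (s ∉ reach.getD c []))
    if unavailable.isEmpty then result else result ++ [(s, unavailable)]) []

-- ===== PRECONDITION & SPEC =====
-- Pre_ excludes pipeline strings of length < 2: on those A raises IndexError whenever BFS reaches them
-- (and returns only when it never indexes them), while B's upfront edge-list build always raises there.
def Pre_find_unreachable (city : List String) (gas_storage : List String) (pipelines : List String) : Prop :=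
  ∀ p ∈ pipelines, 2 ≤ p.toList.length
instance (city : List String) (gas_storage : List String) (pipelines : List String) : Decidable (Pre_find_unreachable city gas_storage pipelines) := by unfold Pre_find_unreachable; infer_instance

def pvWitness_find_unreachable : List String × List String × List String := (["b", "c"], ["a"], ["ab", "bc"])

def Spec_find_unreachable (city : List String) (gas_storage : List String) (pipelines : List String) (out : List (String × List String)) : Prop := out = find_unreachable_alt city gas_storage pipelines
instance (city : List String) (gas_storage : List String) (pipelines : List String) (out : List (String × List String)) : Decidable (Spec_find_unreachable city gas_storage pipelines out) := by unfold Spec_find_unreachable; infer_instance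

-- ===== CLAIM (what is proved, stated in full; the proofs are below) =====
def Claim_equal_find_unreachable : Prop := ∀ (city : List String) (gas_storage : List String) (pipelines : List String), Dom_find_unreachable city gas_storage pipelines → Pre_find_unreachable city gas_storage pipelines → Spec_find_unreachable city gas_storage pipelines (find_unreachable city gas_storage pipelines)

-- ===== LEMMAS AND PROOFS =====

-- the effective neighbour list A traverses from node v
def pvNbrs (gas_storage : List String) (pipelines : List String) (v : String) : List String :=
  pipelines.filterMap (fun conn =>
    match PySem.Str.pyGet? conn 0, PySem.Str.pyGet? conn 1 with
    | some c0, some c1 =>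
      if String.ofList [c0] = v ∧ String.ofList [c1] ∉ gas_storage then some (String.ofList [c1]) else none
    | _, _ => none)

-- every possible enqueued node (second character of some pipeline)
def pvSeconds (pipelines : List String) : List String :=
  pipelines.filterMap (fun conn =>
    match PySem.Str.pyGet? conn 0, PySem.Str.pyGet? conn 1 with
    | some _, some c1 => some (String.ofList [c1])
    | _, _ => none)

inductive PvReach (gas_storage : List String) (pipelines : List String) (start : String) : String → Prop
  | refl : PvReach gas_storage pipelines start start
  | step {y z : String} : PvReach gas_storage pipelines start y → z ∈ pvNbrs gas_storage pipelines y →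
      PvReach gas_storage pipelines start z

lemma pvPushA_eq (gs pls : List String) (cur : String) (q : List String) :
    pvPushA gs pls cur q = q ++ pvNbrs gs pls cur := by
  induction pls generalizing q with
  | nil => simp [pvPushA, pvNbrs]
  | cons conn pls ih =>
    simp only [pvPushA, List.foldl_cons, pvNbrs, List.filterMap_cons] at ih ⊢
    cases h0 : PySem.Str.pyGet? conn 0 with
    | none => simpa [h0] using ih q
    | some c0 =>
      cases h1 : PySem.Str.pyGet? conn 1 with
      | none =>
        by_cases hc : String.ofList [c0] = cur
        · simpa [h0, h1, hc] using ih q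
        · simpa [h0, h1, hc] using ih q
      | some c1 =>
        by_cases hc : String.ofList [c0] = cur
        · by_cases hg : String.ofList [c1] ∈ gs
          · simpa [h0, h1, hc, hg] using ih q
          · simpa [h0, h1, hc, hg, List.append_assoc] using ih (q ++ [String.ofList [c1]])
        · simpa [h0, h1, hc] using ih q

lemma mem_pvNbrs_mem_seconds {gs pls : List String} {v n : String}
    (h : n ∈ pvNbrs gs pls v) : n ∈ pvSeconds pls := by
  simp only [pvNbrs, List.mem_filterMap] at h
  obtain ⟨conn, hconn, hf⟩ := h
  simp only [pvSeconds, List.mem_filterMap]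
  refine ⟨conn, hconn, ?_⟩
  cases h0 : PySem.Str.pyGet? conn 0 with
  | none => rw [h0] at hf; simp at hf
  | some c0 =>
    cases h1 : PySem.Str.pyGet? conn 1 with
    | none => rw [h0, h1] at hf; simp at hf
    | some c1 =>
      rw [h0, h1] at hf
      simp at hf ⊢
      tauto

lemma pvNbrs_len_le (gs pls : List String) (v : String) :
    (pvNbrs gs pls v).length ≤ pls.length := List.length_filterMap_le _ _

lemma pvSeconds_len_le (pls : List String) :
    (pvSeconds pls).length ≤ pls.length := List.length_filterMap_le _ _

-- removing a set of distinct present elements shrinks a list by at least that many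
lemma pvFilterNotMemLen {α : Type} [DecidableEq α] (N : List α) (hN : N.Nodup) :
    ∀ l : List α, (∀ n ∈ N, n ∈ l) →
      (l.filter (fun x => decide (x ∉ N))).length + N.length ≤ l.length := by
  induction N with
  | nil => intro l _; exact List.length_filter_le _ l
  | cons a N ih =>
    intro l hsub
    have ha : a ∈ l := hsub a (List.mem_cons_self ..)
    have hrw : l.filter (fun x => decide (x ∉ a :: N)) =
        (l.filter (fun x => decide (x ≠ a))).filter (fun x => decide (x ∉ N)) := by
      rw [List.filter_filter]
      apply List.filter_congr
      intro x _
      simp [List.mem_cons, not_or, Bool.and_comm]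
    have hlt : (l.filter (fun x => decide (x ≠ a))).length < l.length := by
      apply List.length_filter_lt_length_iff_exists.mpr
      exact ⟨a, ha, by simp⟩
    have hsub' : ∀ n ∈ N, n ∈ l.filter (fun x => decide (x ≠ a)) := by
      intro n hn
      have hne : n ≠ a := fun h => (List.nodup_cons.mp hN).1 (h ▸ hn)
      simp [List.mem_filter, hsub n (List.mem_cons_of_mem _ hn), hne]
    have := ih (List.nodup_cons.mp hN).2 (l.filter (fun x => decide (x ≠ a))) hsub'
    rw [hrw]
    simp only [List.length_cons]
    omega

lemma pvLoopA_run (gs pls : List String) (U : List String)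
    (hU : ∀ v n, n ∈ pvNbrs gs pls v → n ∈ U)
    (S : String → Prop) (hSc : ∀ v n, S v → n ∈ pvNbrs gs pls v → S n) :
    ∀ (fuel : Nat) (visited queue : List String),
      (∀ x ∈ queue, x ∈ U) →
      visited.Nodup →
      (∀ v ∈ visited, ∀ n ∈ pvNbrs gs pls v, n ∈ visited ∨ n ∈ queue) →
      (U.filter (fun x => decide (x ∉ visited))).length * (pls.length + 1) + queue.length ≤ fuel →
      (∀ x ∈ visited, S x) → (∀ x ∈ queue, S x) →
      ∃ ext, pvLoopA gs pls fuel visited queue = visited ++ ext ∧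
        (visited ++ ext).Nodup ∧
        (∀ x ∈ queue, x ∈ visited ++ ext) ∧
        (∀ v ∈ visited ++ ext, ∀ n ∈ pvNbrs gs pls v, n ∈ visited ++ ext) ∧
        (∀ x ∈ visited ++ ext, S x) := by
  intro fuel
  induction fuel with
  | zero =>
    intro visited queue hq hnd hcl hfuel hSv hSq
    have hqnil : queue = [] := List.eq_nil_of_length_eq_zero (by omega)
    subst hqnil
    refine ⟨[], by simp [pvLoopA], by simpa using hnd, by simp, ?_, by simpa using hSv⟩
    intro v hv n hn
    rcases hcl v (by simpa using hv) n hn with h | h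
    · simpa using h
    · simp at h
  | succ fuel ih =>
    intro visited queue hq hnd hcl hfuel hSv hSq
    match queue with
    | [] =>
      refine ⟨[], by simp [pvLoopA], by simpa using hnd, by simp, ?_, by simpa using hSv⟩
      intro v hv n hn
      rcases hcl v (by simpa using hv) n hn with h | h
      · simpa using h
      · simp at h
    | cur :: rest =>
      by_cases hmem : cur ∈ visited
      · have step : pvLoopA gs pls (fuel + 1) visited (cur :: rest) = pvLoopA gs pls fuel visited rest := by
          simp [pvLoopA, hmem]
        obtain ⟨ext, hout, hndo, hqo, hclo, hSo⟩ :=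
          ih visited rest (fun x hx => hq x (List.mem_cons_of_mem _ hx)) hnd
            (by
              intro v hv n hn
              rcases hcl v hv n hn with h | h
              · exact Or.inl h
              · rcases List.mem_cons.mp h with h | h
                · exact Or.inl (h ▸ hmem)
                · exact Or.inr h)
            (by simp only [List.length_cons] at hfuel; omega)
            hSv (fun x hx => hSq x (List.mem_cons_of_mem _ hx))
        refine ⟨ext, step ▸ hout, hndo, ?_, hclo, hSo⟩
        intro x hx
        rcases List.mem_cons.mp hx with h | h
        · exact h ▸ List.mem_append_left _ hmem
        · exact hqo x h
      · have step : pvLoopA gs pls (fuel + 1) visited (cur :: rest) =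
            pvLoopA gs pls fuel (visited ++ [cur]) (rest ++ pvNbrs gs pls cur) := by
          simp [pvLoopA, hmem, pvPushA_eq]
        have hcurU : cur ∈ U := hq cur (List.mem_cons_self ..)
        have hrw : U.filter (fun x => decide (x ∉ visited ++ [cur])) =
            (U.filter (fun x => decide (x ∉ visited))).filter (fun x => decide (x ∉ [cur])) := by
          rw [List.filter_filter]
          apply List.filter_congr
          intro x _
          simp [List.mem_append, not_or, and_comm]
        have hkey : (U.filter (fun x => decide (x ∉ visited ++ [cur]))).length + 1 ≤
            (U.filter (fun x => decide (x ∉ visited))).length := by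
          rw [hrw]
          have := pvFilterNotMemLen [cur] (by simp) (U.filter (fun x => decide (x ∉ visited)))
            (by intro n hn; simp at hn; subst hn; simp [List.mem_filter, hcurU, hmem])
          simpa using this
        have hfuel' : (U.filter (fun x => decide (x ∉ visited ++ [cur]))).length * (pls.length + 1) +
            (rest ++ pvNbrs gs pls cur).length ≤ fuel := by
          have h2 : ((U.filter (fun x => decide (x ∉ visited ++ [cur]))).length + 1) * (pls.length + 1) ≤
              (U.filter (fun x => decide (x ∉ visited))).length * (pls.length + 1) :=
            Nat.mul_le_mul_right _ hkey
          have h3 := pvNbrs_len_le gs pls cur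
          simp only [List.length_append, List.length_cons] at hfuel ⊢
          nlinarith
        obtain ⟨ext, hout, hndo, hqo, hclo, hSo⟩ :=
          ih (visited ++ [cur]) (rest ++ pvNbrs gs pls cur)
            (by
              intro x hx
              rcases List.mem_append.mp hx with h | h
              · exact hq x (List.mem_cons_of_mem _ h)
              · exact hU cur x h)
            (by
              simp [List.nodup_append, hnd]
              intro a ha hac
              exact hmem (hac ▸ ha))
            (by
              intro v hv n hn
              rcases List.mem_append.mp hv with h | h
              · rcases hcl v h n hn with h' | h'
                · exact Or.inl (List.mem_append_left _ h')
                · rcases List.mem_cons.mp h' with h' | h'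
                  · exact Or.inl (h' ▸ List.mem_append_right _ (by simp))
                  · exact Or.inr (List.mem_append_left _ h')
              · have hv' : v = cur := by simpa using h
                exact Or.inr (List.mem_append_right _ (hv' ▸ hn)))
            hfuel'
            (by
              intro x hx
              rcases List.mem_append.mp hx with h | h
              · exact hSv x h
              · exact (by simpa using h : x = cur) ▸ hSq cur (List.mem_cons_self ..))
            (by
              intro x hx
              rcases List.mem_append.mp hx with h | h
              · exact hSq x (List.mem_cons_of_mem _ h)
              · exact hSc cur x (hSq cur (List.mem_cons_self ..)) h)
        refine ⟨cur :: ext, ?_, ?_, ?_, ?_, ?_⟩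
        · rw [step, hout, List.append_assoc]; rfl
        · have := hndo; rwa [List.append_assoc] at this
        · intro x hx
          rcases List.mem_cons.mp hx with h | h
          · subst h
            have : x ∈ visited ++ [x] := List.mem_append_right _ (by simp)
            have := List.mem_append_left ext this
            rwa [List.append_assoc] at this
          · have := hqo x (List.mem_append_left _ h)
            rwa [List.append_assoc] at this
        · intro v hv n hn
          have hshape : visited ++ cur :: ext = visited ++ [cur] ++ ext := by simp
          rw [hshape] at hv ⊢
          exact hclo v hv n hn
        · intro x hx
          have hshape : visited ++ cur :: ext = visited ++ [cur] ++ ext := by simp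
          rw [hshape] at hx
          exact hSo x hx

lemma pvLoopA_char (gs pls : List String) (start : String) :
    ∃ ext, pvLoopA gs pls (pvFuelA pls) [] [start] = start :: ext ∧
      (start :: ext).Nodup ∧ (∀ x, x ∈ start :: ext ↔ PvReach gs pls start x) := by
  have hfz : pvFuelA pls ≠ 0 := Nat.mul_ne_zero (by omega) (by omega)
  obtain ⟨f, hf⟩ : ∃ f, pvFuelA pls = f + 1 :=
    ⟨pvFuelA pls - 1, by omega⟩
  have step : pvLoopA gs pls (pvFuelA pls) [] [start] =
      pvLoopA gs pls f [start] (pvNbrs gs pls start) := by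
    rw [hf]
    have h : pvPushA gs pls start [] = pvNbrs gs pls start := by simp [pvPushA_eq]
    simp [pvLoopA, h]
  have hflarge : f + 1 = (pls.length + 2) * (pls.length + 2) := by
    rw [← hf]; rfl
  obtain ⟨ext, hout, hnd, hqo, hclo, hSo⟩ :=
    pvLoopA_run gs pls (start :: pvSeconds pls)
      (fun v n hn => List.mem_cons_of_mem _ (mem_pvNbrs_mem_seconds hn))
      (PvReach gs pls start) (fun v n hv hn => PvReach.step hv hn)
      f [start] (pvNbrs gs pls start)
      (fun x hx => List.mem_cons_of_mem _ (mem_pvNbrs_mem_seconds hx))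
      (by simp)
      (by intro v hv n hn; exact Or.inr ((by simpa using hv : v = start) ▸ hn))
      (by
        have h1 : ((start :: pvSeconds pls).filter (fun x => decide (x ∉ [start]))).length ≤
            pls.length + 1 := by
          have := List.length_filter_le (fun x => decide (x ∉ [start])) (start :: pvSeconds pls)
          have := pvSeconds_len_le pls
          simp only [List.length_cons] at *
          omega
        have h2 := pvNbrs_len_le gs pls start
        have h3 : (pls.length + 1) * (pls.length + 1) + pls.length + 1 ≤
            (pls.length + 2) * (pls.length + 2) := by nlinarith
        have h4 : ((start :: pvSeconds pls).filter (fun x => decide (x ∉ [start]))).length *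
            (pls.length + 1) ≤ (pls.length + 1) * (pls.length + 1) :=
          Nat.mul_le_mul_right _ h1
        omega)
      (by intro x hx; exact (by simpa using hx : x = start) ▸ PvReach.refl)
      (fun x hx => PvReach.step PvReach.refl hx)
  refine ⟨ext, by rw [step, hout]; rfl, by simpa using hnd, ?_⟩
  intro x
  constructor
  · intro hx
    exact hSo x (by simpa using hx)
  · intro hx
    induction hx with
    | refl => exact List.mem_cons_self ..
    | step hy hn ihy =>
      have := hclo _ (by simpa using ihy) _ hn
      simpa using this

-- A-side characterisation: membership in bfs's returned list is nonempty-path reachability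
lemma pvBfs_char (gs pls : List String) (s e : String) :
    e ∈ pvBfs s gs pls ↔ PvReach gs pls s e ∧ e ≠ s := by
  obtain ⟨ext, hA, hnd, hmem⟩ := pvLoopA_char gs pls s
  have hbfs : pvBfs s gs pls = ext := by
    unfold pvBfs
    rw [hA]
    simp [PySem.List.pop?_zero_cons]
  rw [hbfs]
  have hs' : s ∉ ext := (List.nodup_cons.mp hnd).1
  constructor
  · intro he
    exact ⟨(hmem e).mp (List.mem_cons_of_mem _ he), fun h => hs' (h ▸ he)⟩
  · rintro ⟨hr, hne⟩
    rcases List.mem_cons.mp ((hmem e).mpr hr) with h | h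
    · exact absurd h hne
    · exact h

-- ----- B-side lemmas -----

-- the inner (non-storage) edge list B relaxes
def pvInner (gs pls : List String) : List (String × String) :=
  (pvEdges pls).filter (fun e =>
    decide (e.1 ∉ PySem.Set.ofList gs ∧ e.2 ∉ PySem.Set.ofList gs))

lemma pvMem_pvNbrs_iff (gs pls : List String) (y z : String) :
    z ∈ pvNbrs gs pls y ↔ (y, z) ∈ pvEdges pls ∧ z ∉ gs := by
  simp only [pvNbrs, pvEdges, List.mem_filterMap]
  constructor
  · rintro ⟨conn, hconn, hf⟩
    cases h0 : PySem.Str.pyGet? conn 0 with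
    | none => rw [h0] at hf; simp at hf
    | some c0 =>
      cases h1 : PySem.Str.pyGet? conn 1 with
      | none => rw [h0, h1] at hf; simp at hf
      | some c1 =>
        rw [h0, h1] at hf
        simp at hf
        obtain ⟨⟨hy, hg⟩, hz⟩ := hf
        refine ⟨⟨conn, hconn, ?_⟩, hz ▸ hg⟩
        rw [h0, h1]
        simp [hy, hz]
  · rintro ⟨⟨conn, hconn, hf⟩, hzg⟩
    refine ⟨conn, hconn, ?_⟩
    cases h0 : PySem.Str.pyGet? conn 0 with
    | none => rw [h0] at hf; simp at hf
    | some c0 =>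
      cases h1 : PySem.Str.pyGet? conn 1 with
      | none => rw [h0, h1] at hf; simp at hf
      | some c1 =>
        rw [h0, h1] at hf
        simp at hf ⊢
        obtain ⟨hy, hz⟩ := hf
        exact ⟨⟨hy, hz ▸ hzg⟩, hz⟩
lemma pvMem_pvInner_iff (gs pls : List String) (e : String × String) :
    e ∈ pvInner gs pls ↔ e ∈ pvEdges pls ∧ e.1 ∉ gs ∧ e.2 ∉ gs := by
  simp [pvInner, List.mem_filter, PySem.Set.mem_ofList]

lemma pvEdges_len_le (pls : List String) : (pvEdges pls).length ≤ pls.length :=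
  List.length_filterMap_le _ _

-- init dict characterisation
lemma pvInitReach_getD (ss : PySem.Set String) (edges : List (String × String)) (s b : String) :
    s ∈ (pvInitReach ss edges).getD b [] ↔ (s, b) ∈ edges ∧ s ∈ ss ∧ b ∉ ss := by
  have gen : ∀ (l : List (String × String)) (d : PySem.Dict String (PySem.Set String)),
      (s ∈ (l.foldl (fun r e =>
        if e.1 ∈ ss ∧ e.2 ∉ ss then r.insert e.2 (PySem.Set.add (r.getD e.2 []) e.1) else r) d).getD b []
      ↔ s ∈ d.getD b [] ∨ ((s, b) ∈ l ∧ s ∈ ss ∧ b ∉ ss)) := by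
    intro l
    induction l with
    | nil => intro d; simp
    | cons e l ih =>
      intro d
      simp only [List.foldl_cons]
      by_cases hc : e.1 ∈ ss ∧ e.2 ∉ ss
      · rw [if_pos hc, ih]
        by_cases hb : b = e.2
        · subst hb
          rw [PySem.Dict.getD_insert_self]
          constructor
          · rintro (h | h)
            · rcases (PySem.Set.mem_add _ _ _).mp h with h' | h'
              · exact Or.inl h'
              · exact Or.inr ⟨List.mem_cons.mpr (Or.inl (by rw [h', Prod.mk.eta])), h' ▸ hc.1, hc.2⟩
            · exact Or.inr ⟨List.mem_cons_of_mem _ h.1, h.2⟩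
          · rintro (h | ⟨hm, hss, hbs⟩)
            · exact Or.inl ((PySem.Set.mem_add _ _ _).mpr (Or.inl h))
            · rcases List.mem_cons.mp hm with h | h
              · exact Or.inl ((PySem.Set.mem_add _ _ _).mpr (Or.inr (congrArg Prod.fst h)))
              · exact Or.inr ⟨h, hss, hbs⟩
        · rw [PySem.Dict.getD_insert_of_ne _ _ _ hb]
          constructor
          · rintro (h | h)
            · exact Or.inl h
            · exact Or.inr ⟨List.mem_cons_of_mem _ h.1, h.2⟩
          · rintro (h | ⟨hm, hss, hbs⟩)
            · exact Or.inl h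
            · rcases List.mem_cons.mp hm with h | h
              · exact absurd (congrArg Prod.snd h) hb
              · exact Or.inr ⟨h, hss, hbs⟩
      · rw [if_neg hc, ih]
        constructor
        · rintro (h | h)
          · exact Or.inl h
          · exact Or.inr ⟨List.mem_cons_of_mem _ h.1, h.2⟩
        · rintro (h | ⟨hm, hss, hbs⟩)
          · exact Or.inl h
          · rcases List.mem_cons.mp hm with h | h
            · exact absurd ⟨(congrArg Prod.fst h).symm ▸ hss, (congrArg Prod.snd h).symm ▸ hbs⟩ hc
            · exact Or.inr ⟨h, hss, hbs⟩
  simpa [PySem.Dict.getD_empty] using gen edges PySem.Dict.empty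

lemma pvInitReach_nodup (ss : PySem.Set String) (edges : List (String × String)) (b : String) :
    ((pvInitReach ss edges).getD b []).Nodup := by
  have gen : ∀ (l : List (String × String)) (d : PySem.Dict String (PySem.Set String)),
      (∀ k, (d.getD k []).Nodup) →
      ∀ k, ((l.foldl (fun r e =>
        if e.1 ∈ ss ∧ e.2 ∉ ss then r.insert e.2 (PySem.Set.add (r.getD e.2 []) e.1) else r) d).getD k []).Nodup := by
    intro l
    induction l with
    | nil => intro d h k; simpa using h k
    | cons e l ih =>
      intro d h k
      simp only [List.foldl_cons]
      by_cases hc : e.1 ∈ ss ∧ e.2 ∉ ss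
      · rw [if_pos hc]
        refine ih _ ?_ k
        intro k'
        by_cases hk : k' = e.2
        · subst hk
          rw [PySem.Dict.getD_insert_self]
          exact PySem.Set.nodup_add _ _ (h e.2)
        · rw [PySem.Dict.getD_insert_of_ne _ _ _ hk]
          exact h k'
      · rw [if_neg hc]; exact ih d h k
  exact gen edges PySem.Dict.empty (by simp [PySem.Dict.getD_empty]) b

-- the invariant carried through the fixpoint iteration
def pvInv (gs pls : List String) (r : PySem.Dict String (PySem.Set String)) : Prop :=
  (∀ b, (r.getD b []).Nodup) ∧
  (∀ s b, s ∈ r.getD b [] →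
    s ∈ gs ∧ b ∉ gs ∧ PvReach gs pls s b ∧
    s ∈ (pvEdges pls).map Prod.fst ∧ b ∈ (pvEdges pls).map Prod.snd) ∧
  (∀ s b, s ∈ (pvInitReach (PySem.Set.ofList gs) (pvEdges pls)).getD b [] → s ∈ r.getD b [])

def pvSize (pls : List String) (r : PySem.Dict String (PySem.Set String)) : Nat :=
  ((PySem.Set.ofList ((pvEdges pls).map Prod.snd)).map (fun k => (r.getD k []).length)).sum

lemma pvNodupSubLen {l F : List String} (h1 : l.Nodup) (h2 : F.Nodup) (h3 : ∀ x ∈ l, x ∈ F) :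
    l.length ≤ F.length := by
  have hsub : l.toFinset ⊆ F.toFinset := by
    intro x hx
    simp only [List.mem_toFinset] at *
    exact h3 x hx
  have := Finset.card_le_card hsub
  rwa [List.toFinset_card_of_nodup h1, List.toFinset_card_of_nodup h2] at this

lemma pvSize_le (gs pls : List String) (r : PySem.Dict String (PySem.Set String))
    (h : pvInv gs pls r) : pvSize pls r ≤ pls.length * pls.length := by
  have hterm : ∀ k ∈ PySem.Set.ofList ((pvEdges pls).map Prod.snd),
      (r.getD k []).length ≤ pls.length := by
    intro k _
    have h1 : (r.getD k []).length ≤ (PySem.Set.ofList ((pvEdges pls).map Prod.fst)).length := by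
      refine pvNodupSubLen (h.1 k) (PySem.Set.nodup_ofList _) ?_
      intro x hx
      exact (PySem.Set.mem_ofList _ _).mpr (h.2.1 x k hx).2.2.2.1
    have h2 : (PySem.Set.ofList ((pvEdges pls).map Prod.fst)).length ≤ pls.length := by
      have := PySem.Set.length_ofList_le ((pvEdges pls).map Prod.fst)
      have := pvEdges_len_le pls
      simp only [List.length_map] at *
      omega
    omega
  have hsum := List.sum_le_card_nsmul
    ((PySem.Set.ofList ((pvEdges pls).map Prod.snd)).map (fun k => (r.getD k []).length))
    pls.length
    (by
      intro x hx
      obtain ⟨k, hk, hkx⟩ := List.mem_map.mp hx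
      exact hkx ▸ hterm k hk)
  have hK : (PySem.Set.ofList ((pvEdges pls).map Prod.snd)).length ≤ pls.length := by
    have := PySem.Set.length_ofList_le ((pvEdges pls).map Prod.snd)
    have := pvEdges_len_le pls
    simp only [List.length_map] at *
    omega
  simp only [List.length_map, smul_eq_mul] at hsum
  calc pvSize pls r ≤ (PySem.Set.ofList ((pvEdges pls).map Prod.snd)).length * pls.length := hsum
    _ ≤ pls.length * pls.length := Nat.mul_le_mul_right _ hK

lemma pvSumMapLe {K : List String} {f g : String → Nat} (h : ∀ k ∈ K, f k ≤ g k) :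
    (K.map f).sum ≤ (K.map g).sum := List.sum_le_sum h

lemma pvSumMapLt {K : List String} {f g : String → Nat} (h : ∀ k ∈ K, f k ≤ g k)
    {k0 : String} (hk : k0 ∈ K) (hlt : f k0 < g k0) : (K.map f).sum < (K.map g).sum := by
  induction K with
  | nil => simp at hk
  | cons a K ih =>
    simp only [List.map_cons, List.sum_cons]
    rcases List.mem_cons.mp hk with h0 | h0
    · subst h0
      have := List.sum_le_sum (fun k hk' => h k (List.mem_cons_of_mem _ hk'))
      omega
    · have ha := h a (List.mem_cons_self ..)
      have := ih (fun k hk' => h k (List.mem_cons_of_mem _ hk')) h0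
      omega

-- one pass of the fixpoint: invariant preservation, monotonicity, 'changed' semantics
lemma pvPass_run (gs pls : List String) :
    ∀ (l : List (String × String)), (∀ e ∈ l, e ∈ pvInner gs pls) →
    ∀ (st : PySem.Dict String (PySem.Set String) × Bool), pvInv gs pls st.1 →
      pvInv gs pls (l.foldl pvStep st).1 ∧
      (∀ s b, s ∈ st.1.getD b [] → s ∈ (l.foldl pvStep st).1.getD b []) ∧
      (∀ k, (st.1.getD k []).length ≤ ((l.foldl pvStep st).1.getD k []).length) ∧
      (st.2 = true → (l.foldl pvStep st).2 = true) ∧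
      ((l.foldl pvStep st).2 = false →
        (l.foldl pvStep st).1 = st.1 ∧ ∀ e ∈ l, ∀ s, s ∈ st.1.getD e.1 [] → s ∈ st.1.getD e.2 []) ∧
      (st.2 = false → (l.foldl pvStep st).2 = true → pvSize pls st.1 < pvSize pls (l.foldl pvStep st).1) := by
  intro l
  induction l with
  | nil =>
    intro _ st hinv
    exact ⟨hinv, fun s b h => h, fun k => le_refl _, fun h => h,
      fun _ => ⟨rfl, by simp⟩, fun h1 h2 => by simp_all⟩
  | cons e l ih =>
    intro hl st hinv
    have he := hl e (List.mem_cons_self ..)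
    obtain ⟨heE, he1, he2⟩ := (pvMem_pvInner_iff gs pls e).mp he
    simp only [List.foldl_cons]
    by_cases hra : (st.1.getD e.1 []).isEmpty
    · have hstep : pvStep st e = st := by simp [pvStep, hra]
      rw [hstep]
      obtain ⟨i1, i2, i3, i4, i5, i6⟩ := ih (fun e' he' => hl e' (List.mem_cons_of_mem _ he')) st hinv
      refine ⟨i1, i2, i3, i4, ?_, i6⟩
      intro hfalse
      obtain ⟨heq, hsub⟩ := i5 hfalse
      refine ⟨heq, ?_⟩
      intro e' he' s hs
      rcases List.mem_cons.mp he' with h | h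
      · subst h
        rw [List.isEmpty_iff] at hra
        rw [hra] at hs
        simp at hs
      · exact hsub e' h s hs
    · set ra := st.1.getD e.1 [] with hra_def
      set rb := st.1.getD e.2 [] with hrb_def
      set nw := PySem.Set.union rb ra with hnw_def
      have hunion : nw = rb ++ (PySem.Set.ofList ra).filter (fun y => !(PySem.Set.contains rb y)) :=
        PySem.Set.update_eq_append_filter rb ra
      by_cases hlen : PySem.Set.len nw = PySem.Set.len rb
      · have hstep : pvStep st e = st := by
          simp only [pvStep]
          rw [if_neg (by rw [← hra_def]; exact hra)]
          simp only [← hra_def, ← hrb_def, ← hnw_def]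
          rw [if_pos hlen]
        rw [hstep]
        have hsubE : ∀ s, s ∈ ra → s ∈ rb := by
          intro s hs
          have hlen' : ((PySem.Set.ofList ra).filter (fun y => !(PySem.Set.contains rb y))).length = 0 := by
            have hlapp : nw.length = rb.length + ((PySem.Set.ofList ra).filter (fun y => !(PySem.Set.contains rb y))).length := by
              rw [hunion, List.length_append]
            have hlen2 : (nw.length : Int) = (rb.length : Int) := hlen
            have hlen3 : nw.length = rb.length := Int.natCast_inj.mp hlen2
            omega
          have hnil := List.length_eq_zero_iff.mp hlen'
          have hsin : s ∈ PySem.Set.ofList ra := (PySem.Set.mem_ofList _ _).mpr hs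
          by_contra hns
          have : s ∈ (PySem.Set.ofList ra).filter (fun y => !(PySem.Set.contains rb y)) := by
            rw [List.mem_filter]
            refine ⟨hsin, ?_⟩
            simp only [Bool.not_eq_true']
            rw [← Bool.not_eq_true]
            intro hc
            exact hns ((PySem.Set.contains_iff _ _).mp hc)
          rw [hnil] at this
          simp at this
        obtain ⟨i1, i2, i3, i4, i5, i6⟩ := ih (fun e' he' => hl e' (List.mem_cons_of_mem _ he')) st hinv
        refine ⟨i1, i2, i3, i4, ?_, i6⟩
        intro hfalse
        obtain ⟨heq, hsub⟩ := i5 hfalse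
        refine ⟨heq, ?_⟩
        intro e' he' s hs
        rcases List.mem_cons.mp he' with h | h
        · subst h; exact hsubE s hs
        · exact hsub e' h s hs
      · have hstep : pvStep st e = (st.1.insert e.2 nw, true) := by
          simp only [pvStep]
          rw [if_neg (by rw [← hra_def]; exact hra)]
          simp only [← hra_def, ← hrb_def, ← hnw_def]
          rw [if_neg hlen]
        rw [hstep]
        -- facts about the inserted value
        have hrb_nd : rb.Nodup := hinv.1 e.2
        have hnw_nd : nw.Nodup := PySem.Set.nodup_union rb ra hrb_nd
        have hmem_nw : ∀ s, s ∈ nw ↔ s ∈ rb ∨ s ∈ ra := fun s => PySem.Set.mem_union rb ra s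
        have hrb_le : rb.length < nw.length := by
          have hlapp : nw.length = rb.length + ((PySem.Set.ofList ra).filter (fun y => !(PySem.Set.contains rb y))).length := by
            rw [hunion, List.length_append]
          have hlen3 : nw.length ≠ rb.length := fun h =>
            hlen (show (nw.length : Int) = (rb.length : Int) from congrArg (Nat.cast : Nat → Int) h)
          omega
        have hgetD : ∀ k, (st.1.insert e.2 nw).getD k [] = if k = e.2 then nw else st.1.getD k [] :=
          fun k => PySem.Dict.getD_insert st.1 e.2 k nw []
        -- invariant for the new dict
        have hinv' : pvInv gs pls (st.1.insert e.2 nw) := by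
          refine ⟨?_, ?_, ?_⟩
          · intro b
            rw [hgetD b]
            split_ifs with hb
            · exact hnw_nd
            · exact hinv.1 b
          · intro s b hs
            rw [hgetD b] at hs
            split_ifs at hs with hb
            · subst hb
              rcases (hmem_nw s).mp hs with h | h
              · exact hinv.2.1 s e.2 h
              · obtain ⟨hs_gs, _, hreach, hfst, _⟩ := hinv.2.1 s e.1 h
                refine ⟨hs_gs, he2, ?_, hfst, ?_⟩
                · refine PvReach.step hreach ?_
                  rw [pvMem_pvNbrs_iff]
                  exact ⟨by rwa [Prod.mk.eta], he2⟩
                · exact List.mem_map.mpr ⟨e, heE, rfl⟩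
            · exact hinv.2.1 s b hs
          · intro s b hs
            rw [hgetD b]
            split_ifs with hb
            · subst hb
              exact (hmem_nw s).mpr (Or.inl (hinv.2.2 s e.2 hs))
            · exact hinv.2.2 s b hs
        have hmono : ∀ s b, s ∈ st.1.getD b [] → s ∈ (st.1.insert e.2 nw).getD b [] := by
          intro s b hs
          rw [hgetD b]
          split_ifs with hb
          · subst hb
            exact (hmem_nw s).mpr (Or.inl hs)
          · exact hs
        have hlenmono : ∀ k, (st.1.getD k []).length ≤ ((st.1.insert e.2 nw).getD k []).length := by
          intro k
          rw [hgetD k]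
          split_ifs with hb
          · subst hb
            rw [← hrb_def]
            omega
          · exact le_refl _
        have hsizelt : pvSize pls st.1 < pvSize pls (st.1.insert e.2 nw) := by
          refine pvSumMapLt (f := fun k => (st.1.getD k []).length)
            (g := fun k => ((st.1.insert e.2 nw).getD k []).length)
            (fun k _ => hlenmono k) (k0 := e.2) ?_ ?_
          · exact (PySem.Set.mem_ofList _ _).mpr (List.mem_map.mpr ⟨e, heE, rfl⟩)
          · show (st.1.getD e.2 []).length < ((st.1.insert e.2 nw).getD e.2 []).length
            rw [hgetD e.2, if_pos rfl, ← hrb_def]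
            exact hrb_le
        obtain ⟨i1, i2, i3, i4, i5, i6⟩ :=
          ih (fun e' he' => hl e' (List.mem_cons_of_mem _ he')) (st.1.insert e.2 nw, true) hinv'
        refine ⟨i1, ?_, ?_, ?_, ?_, ?_⟩
        · intro s b hs
          exact i2 s b (hmono s b hs)
        · intro k
          exact le_trans (hlenmono k) (i3 k)
        · intro _; exact i4 rfl
        · intro hfalse
          rw [i4 rfl] at hfalse
          simp at hfalse
        · intro _ _
          have hsizemono : pvSize pls (st.1.insert e.2 nw) ≤
              pvSize pls (l.foldl pvStep (st.1.insert e.2 nw, true)).1 :=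
            pvSumMapLe (fun k _ => i3 k)
          omega

-- a fixpoint is reached within the provided fuel
lemma pvFix_run (gs pls : List String) :
    ∀ (fuel : Nat) (r : PySem.Dict String (PySem.Set String)), pvInv gs pls r →
      pls.length * pls.length + 1 ≤ pvSize pls r + fuel →
      pvInv gs pls (pvFix (pvInner gs pls) fuel r) ∧
      (∀ e ∈ pvInner gs pls, ∀ s,
        s ∈ (pvFix (pvInner gs pls) fuel r).getD e.1 [] →
        s ∈ (pvFix (pvInner gs pls) fuel r).getD e.2 []) := by
  intro fuel
  induction fuel with
  | zero =>
    intro r hinv hfuel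
    have := pvSize_le gs pls r hinv
    omega
  | succ fuel ih =>
    intro r hinv hfuel
    obtain ⟨i1, i2, i3, i4, i5, i6⟩ :=
      pvPass_run gs pls (pvInner gs pls) (fun e he => he) (r, false) hinv
    cases hch : ((pvInner gs pls).foldl pvStep (r, false)).2 with
    | false =>
      obtain ⟨heq, hsub⟩ := i5 hch
      have hfix : pvFix (pvInner gs pls) (fuel + 1) r = r := by
        show (if (pvPass (pvInner gs pls) r).2 then _ else (pvPass (pvInner gs pls) r).1) = r
        rw [show pvPass (pvInner gs pls) r = (pvInner gs pls).foldl pvStep (r, false) from rfl]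
        rw [hch]
        simpa using heq
      rw [hfix]
      exact ⟨hinv, hsub⟩
    | true =>
      have hlt' := i6 rfl hch
      have hlt : pvSize pls r < pvSize pls ((pvInner gs pls).foldl pvStep (r, false)).1 := hlt'
      have hfix : pvFix (pvInner gs pls) (fuel + 1) r =
          pvFix (pvInner gs pls) fuel ((pvInner gs pls).foldl pvStep (r, false)).1 := by
        show (if (pvPass (pvInner gs pls) r).2 then _ else _) = _
        rw [show pvPass (pvInner gs pls) r = (pvInner gs pls).foldl pvStep (r, false) from rfl]
        rw [hch]
        simp
      rw [hfix]
      exact ih ((pvInner gs pls).foldl pvStep (r, false)).1 i1 (by omega)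

-- the fixpoint preserves the init entries (they are inside pvInv)
lemma pvInit_inv (gs pls : List String) :
    pvInv gs pls (pvInitReach (PySem.Set.ofList gs) (pvEdges pls)) := by
  refine ⟨fun b => pvInitReach_nodup _ _ b, ?_, fun s b h => h⟩
  intro s b hs
  rw [pvInitReach_getD] at hs
  obtain ⟨hE, hss, hbs⟩ := hs
  have hs_gs : s ∈ gs := (PySem.Set.mem_ofList _ _).mp hss
  have hb_gs : b ∉ gs := fun h => hbs ((PySem.Set.mem_ofList _ _).mpr h)
  refine ⟨hs_gs, hb_gs, ?_, ?_, ?_⟩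
  · exact PvReach.step PvReach.refl ((pvMem_pvNbrs_iff gs pls s b).mpr ⟨hE, hb_gs⟩)
  · exact List.mem_map.mpr ⟨(s, b), hE, rfl⟩
  · exact List.mem_map.mpr ⟨(s, b), hE, rfl⟩

-- B's computed table characterises nonempty-path reachability from each storage
lemma pvFix_char (gs pls : List String) (s e : String) (hs : s ∈ gs) :
    s ∈ (pvFix (pvInner gs pls) (pvFixFuel pls)
          (pvInitReach (PySem.Set.ofList gs) (pvEdges pls))).getD e [] ↔
      PvReach gs pls s e ∧ e ≠ s := by
  obtain ⟨hinv, hfixed⟩ := pvFix_run gs pls (pvFixFuel pls)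
    (pvInitReach (PySem.Set.ofList gs) (pvEdges pls)) (pvInit_inv gs pls)
    (by simp only [pvFixFuel]; omega)
  set r := pvFix (pvInner gs pls) (pvFixFuel pls)
    (pvInitReach (PySem.Set.ofList gs) (pvEdges pls)) with hr
  constructor
  · intro hmem
    obtain ⟨_, hbg, hreach, _, _⟩ := hinv.2.1 s e hmem
    exact ⟨hreach, fun h => hbg (h ▸ hs)⟩
  · rintro ⟨hreach, hne⟩
    -- strengthened induction: e ≠ s → s ∈ r[e] ∧ e ∉ gs
    suffices h : e ≠ s → s ∈ r.getD e [] ∧ e ∉ gs from (h hne).1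
    clear hne
    induction hreach with
    | refl => intro h; exact absurd rfl h
    | @step y z hy hz ihy =>
      intro _
      have hzE := (pvMem_pvNbrs_iff gs pls y z).mp hz
      have hz_gs : z ∉ gs := hzE.2
      refine ⟨?_, hz_gs⟩
      by_cases hys : y = s
      · have hinit : s ∈ (pvInitReach (PySem.Set.ofList gs) (pvEdges pls)).getD z [] := by
          rw [pvInitReach_getD]
          refine ⟨?_, (PySem.Set.mem_ofList _ _).mpr hs,
            fun h => hz_gs ((PySem.Set.mem_ofList _ _).mp h)⟩
          exact hys ▸ hzE.1
        exact hinv.2.2 s z hinit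
      · obtain ⟨hyr, hy_gs⟩ := ihy hys
        have hyz_inner : (y, z) ∈ pvInner gs pls :=
          (pvMem_pvInner_iff gs pls (y, z)).mpr ⟨hzE.1, hy_gs, hz_gs⟩
        exact hfixed (y, z) hyz_inner s hyr

lemma pv_main (city gs pls : List String) :
    find_unreachable city gs pls = find_unreachable_alt city gs pls := by
  unfold find_unreachable find_unreachable_alt
  apply PySem.List.foldl_congr_mem
  intro acc s hsmem
  have hiff : ∀ c, (c ∉ pvBfs s gs pls) ↔
      (s ∉ (pvFix ((pvEdges pls).filter (fun e =>
        decide (e.1 ∉ PySem.Set.ofList gs ∧ e.2 ∉ PySem.Set.ofList gs)))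
        (pvFixFuel pls) (pvInitReach (PySem.Set.ofList gs) (pvEdges pls))).getD c []) := by
    intro c
    apply not_congr
    rw [pvBfs_char gs pls s c]
    exact (pvFix_char gs pls s c hsmem).symm
  simp only [hiff]

-- ===== VERDICT (by name: the statement is the Claim_ definition above) =====
theorem find_unreachable_spec : Claim_equal_find_unreachable := by
  intro city gs pls _ _
  unfold Spec_find_unreachable
  exact pv_main city gs pls
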